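-- pv_equiv track=rewrite | github.com/Merlness/AoC | 2015/day_5.py | finding_newer_nice_words
-- ===== SOURCE A (Python) =====
-- def finding_newer_nice_words_rule_one(word):
--     for letter_repeats in range(len(word)):
--         #change
--         if word[letter_repeats] == word[letter_repeats -2] and letter_repeats > 1:
--             return True
--     return False
--
-- def finding_newer_nice_words_rule_two(word):
--     for letters_repeat in range(len(word)):
--         for repetition in range(letters_repeat + 2, len(word)-1):
--             #change this
--             if [word[letters_repeat], word[letters_repeat + 1]] == [word[repetition], word[repetition+1]]:
--                 return True
--     return False
--
-- def finding_newer_nice_words(words):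
--     count = 0
--     #fix like 1st star
--     for word in words:
--         first_rule_met = finding_newer_nice_words_rule_one(word)
--         second_rule_met = finding_newer_nice_words_rule_two(word)
--
--         if first_rule_met and second_rule_met:
--             count += 1
--     return count
-- ===== SOURCE B (Python) =====
-- def finding_newer_nice_words(words):
--     count = 0
--     for word in words:
--         n = len(word)
--         first = {}          # pair of letters -> first index where it occurs
--         has_rep = False     # a letter repeats with exactly one letter between
--         has_pair = False    # a pair of two letters appears twice without overlap
--         for i in range(n):
--             if i >= 2 and word[i] == word[i - 2]:
--                 has_rep = True
--             if i + 1 < n: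
--                 p = (word[i], word[i + 1])
--                 if p in first:
--                     if first[p] + 2 <= i:
--                         has_pair = True
--                 else:
--                     first[p] = i
--         if has_rep and has_pair:
--             count += 1
--     return count
-- ===== Notes on version B (the rewrite author's own statement) =====
-- stated objective: faster
-- what changed: Per word, the quadratic nested scan for a repeated letter pair is replaced by a single pass that hashes each pair to its first index and fires when the same pair reappears with gap >= 2; both niceness rules are checked in that one pass.
import Mathlib
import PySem

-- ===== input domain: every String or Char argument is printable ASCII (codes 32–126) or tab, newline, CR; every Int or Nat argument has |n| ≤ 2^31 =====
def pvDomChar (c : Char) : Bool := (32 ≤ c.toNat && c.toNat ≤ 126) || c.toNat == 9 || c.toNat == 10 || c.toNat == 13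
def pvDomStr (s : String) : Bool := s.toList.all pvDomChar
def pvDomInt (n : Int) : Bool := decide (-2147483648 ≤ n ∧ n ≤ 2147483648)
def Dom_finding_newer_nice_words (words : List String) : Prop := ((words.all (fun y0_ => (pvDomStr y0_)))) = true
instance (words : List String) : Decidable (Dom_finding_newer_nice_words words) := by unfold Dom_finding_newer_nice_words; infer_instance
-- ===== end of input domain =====

-- B replaces A's per-word O(n^2) nested scan for a repeated letter pair by a single pass
-- hashing each pair to its first index (fire when the pair reappears with gap >= 2).

-- ===== PORT A =====
-- for letter_repeats in range(len(word)): if word[letter_repeats] == word[letter_repeats-2] and letter_repeats > 1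
def ruleOneA (cs : List Char) : Bool :=
  (List.range cs.length).any (fun i =>
    (PySem.List.pyGet? cs (i : Int) == PySem.List.pyGet? cs ((i : Int) - 2)) && decide (1 < i))

-- for letters_repeat in range(len(word)): for repetition in range(letters_repeat+2, len(word)-1):
--   if [word[i], word[i+1]] == [word[j], word[j+1]]
def ruleTwoA (cs : List Char) : Bool :=
  (List.range cs.length).any (fun i =>
    (PySem.List.pyRange ((i : Int) + 2) ((cs.length : Int) - 1) 1).any (fun j =>
      [PySem.List.pyGet? cs (i : Int), PySem.List.pyGet? cs ((i : Int) + 1)]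
        == [PySem.List.pyGet? cs j, PySem.List.pyGet? cs (j + 1)]))

def finding_newer_nice_words (words : List String) : Int :=
  words.foldl (fun count word =>
    let first_rule_met := ruleOneA word.toList
    let second_rule_met := ruleTwoA word.toList
    if first_rule_met && second_rule_met then count + 1 else count) 0

-- ===== PORT B =====
-- one pass per word: state = (first : dict pair -> first index, has_rep, has_pair)
def altStep (cs : List Char) (st : PySem.Dict (Char × Char) Nat × Bool × Bool) (i : Nat) :
    PySem.Dict (Char × Char) Nat × Bool × Bool :=
  let hasRep := st.2.1 || (decide (2 ≤ i) && (cs.getD i ' ' == cs.getD (i - 2) ' '))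
  if i + 1 < cs.length then
    let p := (cs.getD i ' ', cs.getD (i + 1) ' ')
    match st.1.get? p with
    | some j => (st.1, hasRep, st.2.2 || decide (j + 2 ≤ i))
    | none   => (st.1.insert p i, hasRep, st.2.2)
  else (st.1, hasRep, st.2.2)

def niceAlt (cs : List Char) : Bool :=
  let st := (List.range cs.length).foldl (altStep cs) (PySem.Dict.empty, false, false)
  st.2.1 && st.2.2

def finding_newer_nice_words_alt (words : List String) : Int :=
  words.foldl (fun count word => if niceAlt word.toList then count + 1 else count) 0

-- ===== PRECONDITION & SPEC =====
-- Pre_ excludes inputs containing a word of length exactly 1, on which A raises IndexError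
-- (rule one evaluates word[-2] before its 'letter_repeats > 1' guard).
def Pre_finding_newer_nice_words (words : List String) : Prop :=
  ∀ w ∈ words, PySem.Str.len w ≠ 1
instance (words : List String) : Decidable (Pre_finding_newer_nice_words words) := by
  unfold Pre_finding_newer_nice_words; infer_instance

def pvWitness_finding_newer_nice_words : List String := ["qjhvhtzxzqqjkmpb", "xxyxx", "uurcxstgmygtbstg", "aaa", ""]

def Spec_finding_newer_nice_words (words : List String) (out : Int) : Prop :=
  out = finding_newer_nice_words_alt words
instance (words : List String) (out : Int) : Decidable (Spec_finding_newer_nice_words words out) := by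
  unfold Spec_finding_newer_nice_words; infer_instance

-- ===== CLAIM (what is proved, stated in full; the proofs are below) =====
def Claim_equal_finding_newer_nice_words : Prop :=
  ∀ (words : List String), Dom_finding_newer_nice_words words →
    Pre_finding_newer_nice_words words →
    Spec_finding_newer_nice_words words (finding_newer_nice_words words)

-- ===== LEMMAS AND PROOFS =====

def pairAt (cs : List Char) (t : Nat) : Char × Char := (cs.getD t ' ', cs.getD (t + 1) ' ')

def repP (cs : List Char) (i : Nat) : Bool :=
  decide (2 ≤ i) && (cs.getD i ' ' == cs.getD (i - 2) ' ')

def pairP (cs : List Char) (j : Nat) : Bool :=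
  decide (j + 1 < cs.length) &&
    (List.range j).any (fun f => decide (f + 2 ≤ j) && decide (pairAt cs f = pairAt cs j))

lemma find?_range_min {q : Nat → Bool} {m j : Nat} (h : (List.range m).find? q = some j) :
    q j = true ∧ j < m ∧ ∀ f < j, q f = false := by
  rw [List.find?_eq_some_iff_getElem] at h
  obtain ⟨hq, i, hi, he, hmin⟩ := h
  simp at he hmin hi
  subst he
  exact ⟨hq, hi, fun f hf => by simpa using hmin f hf⟩

lemma altStep_eq (cs : List Char) (st : PySem.Dict (Char × Char) Nat × Bool × Bool) (i : Nat) :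
    altStep cs st i =
      ((if i + 1 < cs.length ∧ st.1.get? (pairAt cs i) = none
          then st.1.insert (pairAt cs i) i else st.1),
       st.2.1 || repP cs i,
       st.2.2 || (decide (i + 1 < cs.length) &&
          (match st.1.get? (pairAt cs i) with
           | some j => decide (j + 2 ≤ i)
           | none => false))) := by
  unfold altStep repP pairAt
  by_cases h : i + 1 < cs.length
  · cases hget : st.1.get? (cs.getD i ' ', cs.getD (i + 1) ' ') <;> simp only [hget] <;> simp [h]
  · simp [h]

lemma alt_invariant (cs : List Char) (k : Nat) :
    (∀ p, ((List.range k).foldl (altStep cs) (PySem.Dict.empty, false, false)).1.get? p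
        = (List.range (min k (cs.length - 1))).find? (fun f => decide (pairAt cs f = p))) ∧
    ((List.range k).foldl (altStep cs) (PySem.Dict.empty, false, false)).2.1
        = (List.range k).any (repP cs) ∧
    ((List.range k).foldl (altStep cs) (PySem.Dict.empty, false, false)).2.2
        = (List.range k).any (pairP cs) := by
  induction k with
  | zero => simp [PySem.Dict.get?_empty]
  | succ k ih =>
    obtain ⟨ihd, ihr, ihp⟩ := ih
    rw [List.range_succ]
    simp only [List.foldl_append, List.foldl_cons, List.foldl_nil, List.any_append,
      List.any_cons, List.any_nil, Bool.or_false]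
    set S := (List.range k).foldl (altStep cs) (PySem.Dict.empty, false, false) with hS
    rw [altStep_eq]
    dsimp only
    refine ⟨?_, by rw [ihr], ?_⟩
    · intro p
      by_cases h : k + 1 < cs.length
      · have hmin : min k (cs.length - 1) = k := by omega
        have hmin' : min (k + 1) (cs.length - 1) = k + 1 := by omega
        rw [hmin'] at *
        rw [List.range_succ, List.find?_append]
        have hpre : (List.range k).find? (fun f => decide (pairAt cs f = p)) = S.1.get? p := by
          rw [ihd p, hmin]
        rw [hpre]
        cases hget : S.1.get? (pairAt cs k) with
        | none =>
          rw [if_pos ⟨h, rfl⟩]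
          by_cases hp : p = pairAt cs k
          · subst hp
            rw [PySem.Dict.get?_insert_self, hget]
            simp
          · rw [PySem.Dict.get?_insert_of_ne S.1 k hp]
            cases hq : S.1.get? p with
            | some v => simp
            | none =>
              have : pairAt cs k ≠ p := fun he => hp he.symm
              simp [this]
        | some j =>
          rw [if_neg (by simp)]
          cases hq : S.1.get? p with
          | some v => simp
          | none =>
            have : pairAt cs k ≠ p := by
              intro he; rw [he] at hget; rw [hget] at hq; simp at hq
            simp [this]
      · have hmin2 : min (k + 1) (cs.length - 1) = min k (cs.length - 1) := by omega
        rw [if_neg (by intro hc; exact h hc.1), hmin2, ihd p]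
    · by_cases h : k + 1 < cs.length
      · have hmin : min k (cs.length - 1) = k := by omega
        cases hget : S.1.get? (pairAt cs k) with
        | some j =>
          show (S.2.2 || (decide (k + 1 < cs.length) && decide (j + 2 ≤ k))) = _
          simp only [h, decide_true, Bool.true_and]
          rw [ihp]
          congr 1
          have hj := find?_range_min ((ihd (pairAt cs k)).symm.trans hget)
          rw [hmin] at hj
          obtain ⟨hjq, hjk, hjmin⟩ := hj
          simp only [decide_eq_true_eq] at hjq
          rw [Bool.eq_iff_iff]
          simp only [pairP, Bool.and_eq_true, decide_eq_true_eq, List.any_eq_true,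
            List.mem_range]
          constructor
          · intro hle
            exact ⟨h, j, hjk, hle, hjq⟩
          · rintro ⟨-, f, hf, hgap, heq⟩
            rcases Nat.lt_or_ge f j with hfj | hfj
            · have := hjmin f hfj
              simp [heq] at this
            · omega
        | none =>
          have hfalse : pairP cs k = false := by
            rw [Bool.eq_false_iff]
            intro ht
            simp only [pairP, Bool.and_eq_true, decide_eq_true_eq, List.any_eq_true,
              List.mem_range] at ht
            obtain ⟨-, f, hf, hgap, heq⟩ := ht
            have hmem : f ∈ List.range (min k (cs.length - 1)) := by
              simp only [List.mem_range]; omega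
            have := List.find?_eq_none.mp ((ihd (pairAt cs k)).symm.trans hget) f hmem
            simp [heq] at this
          rw [ihp, hfalse]
          simp
      · have hfalse : pairP cs k = false := by
          simp only [pairP, Bool.and_eq_false_iff]
          left; simpa using h
        rw [ihp, hfalse]
        simp [h]

lemma ruleOneA_eq (cs : List Char) : ruleOneA cs = (List.range cs.length).any (repP cs) := by
  unfold ruleOneA
  apply PySem.List.any_congr_mem
  intro i hi
  simp only [List.mem_range] at hi
  by_cases h2 : 2 ≤ i
  · have hc : ((i : Int) - 2) = ((i - 2 : Nat) : Int) := by omega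
    rw [hc]
    simp only [PySem.List.pyGet?_natCast, repP]
    rw [List.getElem?_eq_getElem hi, List.getElem?_eq_getElem (show i - 2 < cs.length by omega)]
    rw [List.getD_eq_getElem cs ' ' hi, List.getD_eq_getElem cs ' ' (show i - 2 < cs.length by omega)]
    simp [h2, show 1 < i by omega]
  · simp [repP, h2, show ¬ 1 < i by omega]

lemma ruleTwoA_eq (cs : List Char) : ruleTwoA cs = (List.range cs.length).any (pairP cs) := by
  rw [Bool.eq_iff_iff]
  simp only [ruleTwoA, pairP, pairAt, List.any_eq_true, List.mem_range,
    PySem.List.mem_pyRange_one, Bool.and_eq_true, decide_eq_true_eq]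
  constructor
  · rintro ⟨i, hi, j, ⟨hj1, hj2⟩, heq⟩
    have hjn : j.toNat + 1 < cs.length := by omega
    have hi1 : i + 1 < cs.length := by omega
    rw [show j = ((j.toNat : Nat) : Int) by omega] at heq
    rw [show ((j.toNat : Nat) : Int) + 1 = (((j.toNat + 1 : Nat)) : Int) by push_cast; ring,
        show ((i : Nat) : Int) + 1 = (((i + 1 : Nat)) : Int) by push_cast; ring] at heq
    simp only [PySem.List.pyGet?_natCast, List.cons_beq_cons, BEq.rfl, Bool.and_true,
      Bool.and_eq_true, beq_iff_eq] at heq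
    refine ⟨j.toNat, by omega, hjn, i, by omega, by omega, ?_⟩
    simp [List.getD_eq_getElem?_getD, heq.1, heq.2]
  · rintro ⟨jj, hj, hj1, f, hf, hgap, heq⟩
    refine ⟨f, by omega, (jj : Int), ⟨by omega, by omega⟩, ?_⟩
    rw [show ((jj : Nat) : Int) + 1 = (((jj + 1 : Nat)) : Int) by push_cast; ring,
        show ((f : Nat) : Int) + 1 = (((f + 1 : Nat)) : Int) by push_cast; ring]
    simp only [PySem.List.pyGet?_natCast, List.cons_beq_cons, BEq.rfl, Bool.and_true,
      Bool.and_eq_true, beq_iff_eq]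
    rw [List.getD_eq_getElem cs ' ' (show f < cs.length by omega),
        List.getD_eq_getElem cs ' ' (show f + 1 < cs.length by omega),
        List.getD_eq_getElem cs ' ' (show jj < cs.length by omega),
        List.getD_eq_getElem cs ' ' hj1] at heq
    simp only [Prod.ext_iff] at heq
    rw [List.getElem?_eq_getElem (show f < cs.length by omega),
        List.getElem?_eq_getElem (show f + 1 < cs.length by omega),
        List.getElem?_eq_getElem (show jj < cs.length by omega),
        List.getElem?_eq_getElem hj1]
    simp [heq.1, heq.2]

lemma nice_eq (cs : List Char) : (ruleOneA cs && ruleTwoA cs) = niceAlt cs := by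
  obtain ⟨-, hr, hp⟩ := alt_invariant cs cs.length
  rw [ruleOneA_eq, ruleTwoA_eq, ← hr, ← hp]
  rfl

-- ===== VERDICT (by name: the statement is the Claim_ definition above) =====
theorem finding_newer_nice_words_spec : Claim_equal_finding_newer_nice_words := by
  intro words _ _
  unfold Spec_finding_newer_nice_words finding_newer_nice_words finding_newer_nice_words_alt
  have hfg : (fun (count : Int) (word : String) =>
      let first_rule_met := ruleOneA word.toList
      let second_rule_met := ruleTwoA word.toList
      if first_rule_met && second_rule_met then count + 1 else count)
      = (fun (count : Int) (word : String) => if niceAlt word.toList then count + 1 else count) := by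
    funext count word
    show (if ruleOneA word.toList && ruleTwoA word.toList then count + 1 else count) = _
    rw [nice_eq]
  rw [hfg]
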